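-- pv_equiv track=rewrite | github.com/KarimHabbal1/Physics_Informed_Convnet | SINDy.py | sindy_library_names
-- ===== SOURCE A (Python) =====
-- def sindy_library_names(latent_dim, poly_order, include_sine=False):
--     # Upgrade to combinations
--     symbs = ['x', 'y', 'z', '4', '5', '6', '7']
--
--     n = latent_dim
--     index = 1
--     names = ['1']
--
--     for i in range(n):
--         names.append(symbs[i])
--         index += 1
--
--     if poly_order > 1:
--         for i in range(n):
--             for j in range(i,n):
--                 names.append(symbs[i]+symbs[j])
--                 index += 1
--
--     if poly_order > 2:
--         for i in range(n):
--             for j in range(i,n):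
--                 for k in range(j,n):
--                     names.append(symbs[i]+symbs[j]+symbs[k])
--                     index += 1
--
--     if poly_order > 3:
--         for i in range(n):
--             for j in range(i,n):
--                 for k in range(j,n):
--                     for q in range(k,n):
--                         names.append(symbs[i]+symbs[j]+symbs[k]+symbs[q])
--                         index += 1
--
--     if poly_order > 4:
--         for i in range(n):
--             for j in range(i,n):
--                 for k in range(j,n):
--                     for q in range(k,n):
--                         for r in range(q,n):
--                             names.append(symbs[i]+symbs[j]+symbs[k]+symbs[q]+symbs[r])
--                             index += 1
--
--     if include_sine:
--         for i in range(n):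
--             names.append('sin('+symbs[i]+')')
--             index += 1
--
--     return names
-- ===== SOURCE B (Python) =====
-- def _cwr(n, start, k):
--     # combinations with replacement of range(start, n), length k, lexicographic
--     if k == 0:
--         return [[]]
--     return [[i] + rest for i in range(start, n) for rest in _cwr(n, i, k - 1)]
--
--
-- def sindy_library_names(latent_dim, poly_order, include_sine=False):
--     symbs = ['x', 'y', 'z', '4', '5', '6', '7']
--     names = ['1']
--     for idx in range(max(1, min(poly_order, 5))):
--         for combo in _cwr(latent_dim, 0, idx + 1):
--             names.append(''.join(symbs[i] for i in combo))
--     if include_sine: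
--         names.extend('sin(' + symbs[i] + ')' for i in range(latent_dim))
--     return names
-- ===== Notes on version B (the rewrite author's own statement) =====
-- stated objective: simpler
-- what changed: Replaces the five hardcoded nested-loop blocks (one per polynomial order) with a single loop over orders that enumerates combinations-with-replacement recursively and joins the symbols, so one generic enumeration covers all orders.
import Mathlib
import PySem

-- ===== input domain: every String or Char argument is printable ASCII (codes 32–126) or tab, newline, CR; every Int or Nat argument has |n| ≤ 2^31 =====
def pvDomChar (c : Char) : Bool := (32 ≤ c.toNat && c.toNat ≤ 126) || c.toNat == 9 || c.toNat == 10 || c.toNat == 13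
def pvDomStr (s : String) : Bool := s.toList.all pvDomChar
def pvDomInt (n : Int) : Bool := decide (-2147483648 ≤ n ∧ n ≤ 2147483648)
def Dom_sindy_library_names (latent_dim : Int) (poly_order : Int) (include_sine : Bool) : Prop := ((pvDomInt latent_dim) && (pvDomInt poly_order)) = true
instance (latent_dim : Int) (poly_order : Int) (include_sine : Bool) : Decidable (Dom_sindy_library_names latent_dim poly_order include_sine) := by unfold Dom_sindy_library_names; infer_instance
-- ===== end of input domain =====

-- B replaces A's five hardcoded nested-loop blocks by one generic order-parameterized
-- combinations-with-replacement enumeration (objective: simpler).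

-- symbs[i]; .getD "" is only reached where Python raises IndexError (excluded by Pre_)
def pvSym (i : Int) : String :=
  (PySem.List.pyGet? ["x", "y", "z", "4", "5", "6", "7"] i).getD ""

-- ===== PORT A =====
def sindy_library_names (latent_dim : Int) (poly_order : Int) (include_sine : Bool) : List String :=
  let n := latent_dim
  let names := ["1"]
  let names := (PySem.List.pyRange 0 n 1).foldl (fun acc i => acc ++ [pvSym i]) names
  let names :=
    if poly_order > 1 then
      (PySem.List.pyRange 0 n 1).foldl (fun acc i =>
        (PySem.List.pyRange i n 1).foldl (fun acc j =>
          acc ++ [pvSym i ++ pvSym j]) acc) names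
    else names
  let names :=
    if poly_order > 2 then
      (PySem.List.pyRange 0 n 1).foldl (fun acc i =>
        (PySem.List.pyRange i n 1).foldl (fun acc j =>
          (PySem.List.pyRange j n 1).foldl (fun acc k =>
            acc ++ [pvSym i ++ pvSym j ++ pvSym k]) acc) acc) names
    else names
  let names :=
    if poly_order > 3 then
      (PySem.List.pyRange 0 n 1).foldl (fun acc i =>
        (PySem.List.pyRange i n 1).foldl (fun acc j =>
          (PySem.List.pyRange j n 1).foldl (fun acc k =>
            (PySem.List.pyRange k n 1).foldl (fun acc q =>
              acc ++ [pvSym i ++ pvSym j ++ pvSym k ++ pvSym q]) acc) acc) acc) names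
    else names
  let names :=
    if poly_order > 4 then
      (PySem.List.pyRange 0 n 1).foldl (fun acc i =>
        (PySem.List.pyRange i n 1).foldl (fun acc j =>
          (PySem.List.pyRange j n 1).foldl (fun acc k =>
            (PySem.List.pyRange k n 1).foldl (fun acc q =>
              (PySem.List.pyRange q n 1).foldl (fun acc r =>
                acc ++ [pvSym i ++ pvSym j ++ pvSym k ++ pvSym q ++ pvSym r]) acc) acc) acc) acc) names
    else names
  let names :=
    if include_sine then
      (PySem.List.pyRange 0 n 1).foldl (fun acc i => acc ++ ["sin(" ++ pvSym i ++ ")"]) names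
    else names
  names

-- ===== PORT B =====
-- _cwr from Source B: combinations with replacement of range(start, n), length k
def pvCwr (n start : Int) (k : Nat) : List (List Int) :=
  match k with
  | 0 => [[]]
  | k' + 1 =>
      (PySem.List.pyRange start n 1).flatMap (fun i =>
        (pvCwr n i k').map (fun rest => i :: rest))

def sindy_library_names_alt (latent_dim : Int) (poly_order : Int) (include_sine : Bool) : List String :=
  let poly :=
    (List.range (max 1 (min poly_order 5)).toNat).flatMap (fun idx =>
      (pvCwr latent_dim 0 (idx + 1)).map (fun combo => String.join (combo.map pvSym)))
  let sines :=
    if include_sine then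
      (PySem.List.pyRange 0 latent_dim 1).map (fun i => "sin(" ++ pvSym i ++ ")")
    else []
  ["1"] ++ poly ++ sines

-- ===== PRECONDITION & SPEC =====
-- Pre_ excludes latent_dim ≥ 8, on which A raises IndexError (symbs has only 7 entries)
def Pre_sindy_library_names (latent_dim : Int) (poly_order : Int) (include_sine : Bool) : Prop :=
  latent_dim ≤ 7
instance (latent_dim : Int) (poly_order : Int) (include_sine : Bool) : Decidable (Pre_sindy_library_names latent_dim poly_order include_sine) := by unfold Pre_sindy_library_names; infer_instance

def pvWitness_sindy_library_names : Int × Int × Bool := (3, 3, true)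

def Spec_sindy_library_names (latent_dim : Int) (poly_order : Int) (include_sine : Bool) (out : List String) : Prop := out = sindy_library_names_alt latent_dim poly_order include_sine
instance (latent_dim : Int) (poly_order : Int) (include_sine : Bool) (out : List String) : Decidable (Spec_sindy_library_names latent_dim poly_order include_sine out) := by unfold Spec_sindy_library_names; infer_instance

-- ===== CLAIM (what is proved, stated in full; the proofs are below) =====
def Claim_equal_sindy_library_names : Prop := ∀ (latent_dim : Int) (poly_order : Int) (include_sine : Bool), Dom_sindy_library_names latent_dim poly_order include_sine → Pre_sindy_library_names latent_dim poly_order include_sine → Spec_sindy_library_names latent_dim poly_order include_sine (sindy_library_names latent_dim poly_order include_sine)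

-- ===== LEMMAS AND PROOFS =====

theorem A_empty (n p : Int) (s : Bool) (hn : n ≤ 0) :
    sindy_library_names n p s = ["1"] := by
  simp [sindy_library_names, PySem.List.pyRange_one_eq_nil hn]

theorem alt_empty (n p : Int) (s : Bool) (hn : n ≤ 0) :
    sindy_library_names_alt n p s = ["1"] := by
  simp [sindy_library_names_alt, pvCwr, PySem.List.pyRange_one_eq_nil hn]

theorem A_param (n p c : Int) (s : Bool)
    (h1 : p > 1 ↔ c > 1) (h2 : p > 2 ↔ c > 2) (h3 : p > 3 ↔ c > 3) (h4 : p > 4 ↔ c > 4) :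
    sindy_library_names n p s = sindy_library_names n c s := by
  simp only [sindy_library_names, h1, h2, h3, h4]

theorem alt_param (n p c : Int) (s : Bool) (h : max 1 (min p 5) = max 1 (min c 5)) :
    sindy_library_names_alt n p s = sindy_library_names_alt n c s := by
  simp only [sindy_library_names_alt, h]

set_option maxRecDepth 400000 in
set_option maxHeartbeats 4000000 in
theorem case_lit (n c : Int) (s : Bool)
    (hn : n = 1 ∨ n = 2 ∨ n = 3 ∨ n = 4 ∨ n = 5 ∨ n = 6 ∨ n = 7)
    (hc : c = 1 ∨ c = 2 ∨ c = 3 ∨ c = 4 ∨ c = 5) :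
    sindy_library_names n c s = sindy_library_names_alt n c s := by
  rcases hn with rfl|rfl|rfl|rfl|rfl|rfl|rfl <;>
    rcases hc with rfl|rfl|rfl|rfl|rfl <;> revert s <;> decide

-- ===== VERDICT (by name: the statement is the Claim_ definition above) =====
theorem sindy_library_names_spec : Claim_equal_sindy_library_names := by
  intro n p s hdom hpre
  unfold Spec_sindy_library_names
  have hd : -2147483648 ≤ n ∧ n ≤ 2147483648 ∧ -2147483648 ≤ p ∧ p ≤ 2147483648 := by
    simp [Dom_sindy_library_names, pvDomInt] at hdom; omega
  have hp7 : n ≤ 7 := hpre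
  rcases (by omega : n ≤ 0 ∨ n = 1 ∨ n = 2 ∨ n = 3 ∨ n = 4 ∨ n = 5 ∨ n = 6 ∨ n = 7) with h0 | hlit
  · rw [A_empty n p s h0, alt_empty n p s h0]
  · rcases (by omega : p ≤ 1 ∨ p = 2 ∨ p = 3 ∨ p = 4 ∨ 5 ≤ p) with h | rfl | rfl | rfl | h
    · rw [A_param n p 1 s (by omega) (by omega) (by omega) (by omega),
          alt_param n p 1 s (by omega)]
      exact case_lit n 1 s hlit (by tauto)
    · exact case_lit n 2 s hlit (by tauto)
    · exact case_lit n 3 s hlit (by tauto)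
    · exact case_lit n 4 s hlit (by tauto)
    · rw [A_param n p 5 s (by omega) (by omega) (by omega) (by omega),
          alt_param n p 5 s (by omega)]
      exact case_lit n 5 s hlit (by tauto)
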